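-- pv_equiv track=rewrite | github.com/1mizhgun1/BKIT | RK2/main.py | task_2
-- ===== SOURCE A (Python) =====
-- def task_2(one_to_many):
--     ''' returns languages with max functions numbers in one library of each language
--         languages are sorted by these numbers'''
--     ans = {}
--     for x, func_num, lang_name in one_to_many:
--         if lang_name in ans:
--             ans[lang_name] = max(ans[lang_name], func_num)
--         else:
--             ans[lang_name] = func_num
--     ans = {key: value for key, value in sorted(ans.items(), key=lambda item: item[1])}
--     return ans
-- ===== SOURCE B (Python) =====
-- def task_2(one_to_many):
--     ''' returns languages with max functions numbers in one library of each language
--         languages are sorted by these numbers'''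
--     grouped = {}
--     for _x, func_num, lang_name in one_to_many:
--         grouped.setdefault(lang_name, []).append(func_num)
--     ans = {lang: max(vals) for lang, vals in grouped.items()}
--     return dict(sorted(ans.items(), key=lambda item: item[1]))
-- ===== Notes on version B (the rewrite author's own statement) =====
-- stated objective: alternative
-- what changed: Replaces A's single-pass running-max with an if/else branch by a two-pass collect-then-reduce: group all func_nums per language into lists (setdefault/append), then take max of each group, then sort by value as before.
import Mathlib
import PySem

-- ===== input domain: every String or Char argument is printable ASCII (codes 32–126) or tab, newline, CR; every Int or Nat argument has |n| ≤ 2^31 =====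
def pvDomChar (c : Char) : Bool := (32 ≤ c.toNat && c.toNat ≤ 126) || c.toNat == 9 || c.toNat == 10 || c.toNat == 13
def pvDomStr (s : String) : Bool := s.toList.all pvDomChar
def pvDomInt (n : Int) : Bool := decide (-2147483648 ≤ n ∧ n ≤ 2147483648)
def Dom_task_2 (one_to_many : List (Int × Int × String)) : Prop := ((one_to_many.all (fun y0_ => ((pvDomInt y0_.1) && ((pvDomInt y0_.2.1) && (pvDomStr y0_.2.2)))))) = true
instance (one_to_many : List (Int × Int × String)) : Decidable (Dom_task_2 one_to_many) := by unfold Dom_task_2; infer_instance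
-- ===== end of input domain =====

-- B replaces A's running-max-with-branch loop by a collect-then-reduce shape (group every func_num
-- under its language, then take max per group); same result, same asymptotic cost (objective: alternative).

-- ===== PORT A =====
def task_2 (one_to_many : List (Int × Int × String)) : List (String × Int) :=
  -- ans = {}; for x, func_num, lang_name in one_to_many: …
  let ans : PySem.Dict String Int :=
    one_to_many.foldl (fun ans t =>
      if ans.contains t.2.2 then
        -- ans[lang_name] = max(ans[lang_name], func_num)  (key present, so getD's default is never used)
        ans.insert t.2.2 (max ((ans.get? t.2.2).getD 0) t.2.1)
      else
        ans.insert t.2.2 t.2.1) PySem.Dict.empty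
  -- ans = {key: value for key, value in sorted(ans.items(), key=lambda item: item[1])}
  (PySem.Dict.ofList (PySem.List.sorted ans.items (fun item => item.2))).items

-- ===== PORT B =====
-- max(vals) on a list of ints; vals is nonempty at every call site, so getD's default is never used
def pyMaxList (vals : List Int) : Int := (PySem.List.max? vals (fun y => y)).getD 0

def task_2_alt (one_to_many : List (Int × Int × String)) : List (String × Int) :=
  -- grouped.setdefault(lang_name, []).append(func_num)  =  grouped[lang_name] = grouped.get(lang_name, []) + [func_num]
  let grouped : PySem.Dict String (List Int) :=
    one_to_many.foldl (fun g t => g.modify t.2.2 [] (fun vs => vs ++ [t.2.1])) PySem.Dict.empty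
  -- ans = {lang: max(vals) for lang, vals in grouped.items()}
  let ans : PySem.Dict String Int :=
    PySem.Dict.ofList (grouped.items.map (fun kv => (kv.1, pyMaxList kv.2)))
  -- dict(sorted(ans.items(), key=lambda item: item[1]))
  (PySem.Dict.ofList (PySem.List.sorted ans.items (fun item => item.2))).items

-- ===== PRECONDITION & SPEC =====
def Spec_task_2 (one_to_many : List (Int × Int × String)) (out : List (String × Int)) : Prop := out = task_2_alt one_to_many
instance (one_to_many : List (Int × Int × String)) (out : List (String × Int)) : Decidable (Spec_task_2 one_to_many out) := by unfold Spec_task_2; infer_instance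

-- ===== CLAIM (what is proved, stated in full; the proofs are below) =====
def Claim_equal_task_2 : Prop := ∀ (one_to_many : List (Int × Int × String)), Dom_task_2 one_to_many → Spec_task_2 one_to_many (task_2 one_to_many)

-- ===== LEMMAS AND PROOFS =====

-- A's loop step and B's loop step, named for the proofs (definitionally the fold bodies of the ports)
def stepA (ans : PySem.Dict String Int) (t : Int × Int × String) : PySem.Dict String Int :=
  if ans.contains t.2.2 then
    ans.insert t.2.2 (max ((ans.get? t.2.2).getD 0) t.2.1)
  else
    ans.insert t.2.2 t.2.1

def stepB (g : PySem.Dict String (List Int)) (t : Int × Int × String) : PySem.Dict String (List Int) :=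
  g.modify t.2.2 [] (fun vs => vs ++ [t.2.1])

-- the simulation map: a grouping dict viewed through max-per-group
def mapD (g : PySem.Dict String (List Int)) : PySem.Dict String Int :=
  PySem.Dict.mk (g.items.map (fun kv => (kv.1, pyMaxList kv.2)))

-- invariant maintained by B's grouping loop
def GInv (g : PySem.Dict String (List Int)) : Prop :=
  g.keys.Nodup ∧ ∀ kv ∈ g.items, kv.2 ≠ []

lemma pyMaxList_singleton (f : Int) : pyMaxList [f] = f := by
  simp [pyMaxList, PySem.List.max?_id_cons]

lemma pyMaxList_append (vs : List Int) (h : vs ≠ []) (f : Int) :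
    pyMaxList (vs ++ [f]) = max (pyMaxList vs) f := by
  cases vs with
  | nil => exact absurd rfl h
  | cons x t =>
      simp [pyMaxList, PySem.List.max?_id_cons, List.foldl_append]

lemma contains_mapD (g : PySem.Dict String (List Int)) (k : String) :
    (mapD g).contains k = g.contains k := by
  cases g with
  | mk items => simp [mapD, PySem.Dict.contains_mk, List.any_map, Function.comp_def]

lemma keys_mapD (g : PySem.Dict String (List Int)) : (mapD g).keys = g.keys := by
  cases g with
  | mk items => simp [mapD, PySem.Dict.keys, List.map_map, Function.comp]

lemma ginv_stepB (g : PySem.Dict String (List Int)) (t : Int × Int × String) (h : GInv g) :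
    GInv (stepB g t) := by
  obtain ⟨hnd, hne⟩ := h
  constructor
  · exact PySem.Dict.nodup_keys_insert _ _ _ hnd
  · intro kv hkv
    unfold stepB PySem.Dict.modify at hkv
    by_cases hc : g.contains t.2.2 = true
    · rw [PySem.Dict.items_insert_of_contains _ _ hc] at hkv
      obtain ⟨p, hp, hpe⟩ := List.mem_map.mp hkv
      by_cases hpk : (p.1 == t.2.2) = true
      · simp [hpk] at hpe; simp [← hpe]
      · simp [hpk] at hpe; exact hpe ▸ hne p hp
    · rw [PySem.Dict.items_insert_of_not_contains _ _ (by simpa using hc)] at hkv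
      rcases List.mem_append.mp hkv with h1 | h2
      · exact hne kv h1
      · simp at h2; simp [h2]

lemma step_comm (g : PySem.Dict String (List Int)) (t : Int × Int × String) (h : GInv g) :
    stepA (mapD g) t = mapD (stepB g t) := by
  obtain ⟨hnd, hne⟩ := h
  unfold stepA stepB PySem.Dict.modify
  by_cases hc : g.contains t.2.2 = true
  · -- key present: both sides replace the entry at t.2.2 in place
    have hcm : (mapD g).contains t.2.2 = true := by rw [contains_mapD]; exact hc
    rw [if_pos hcm]
    -- g.get? t.2.2 = some vs for some vs
    have hsome : (g.get? t.2.2).isSome := by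
      rw [← PySem.Dict.contains_eq_isSome_get?]; exact hc
    obtain ⟨vs, hvs⟩ : ∃ vs, g.get? t.2.2 = some vs := Option.isSome_iff_exists.mp hsome
    have hmem : (t.2.2, vs) ∈ g.items := PySem.Dict.mem_items_of_get?_eq_some _ hvs
    have hvs_ne : vs ≠ [] := hne _ hmem
    have hndm : (mapD g).keys.Nodup := by rw [keys_mapD]; exact hnd
    have hget : (mapD g).get? t.2.2 = some (pyMaxList vs) := by
      refine PySem.Dict.get?_of_mem_items _ ?_ hndm
      cases g with
      | mk items => exact List.mem_map.mpr ⟨(t.2.2, vs), hmem, rfl⟩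
    have hgetD : g.getD t.2.2 [] = vs := by simp [PySem.Dict.getD, hvs]
    rw [hget, hgetD]
    apply PySem.Dict.ext
    rw [PySem.Dict.items_insert_of_contains _ _ hcm]
    simp only [mapD]
    rw [PySem.Dict.items_insert_of_contains _ _ hc]
    cases g with
    | mk items =>
        simp only [List.map_map]
        apply List.map_congr_left
        intro p hp
        by_cases hpk : (p.1 == t.2.2) = true
        · have : p = (t.2.2, vs) := by
            cases p with
            | mk pk pv =>
              have hk : pk = t.2.2 := by simpa using hpk
              subst hk
              have h2 := PySem.Dict.get?_of_mem_items (PySem.Dict.mk items) hp hnd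
              rw [hvs] at h2
              simp at h2
              simp [h2]
          subst this
          simp [Function.comp, pyMaxList_append vs hvs_ne]
        · simp [Function.comp, hpk]
  · -- key absent: both sides append a fresh entry
    have hc' : g.contains t.2.2 = false := by simpa using hc
    have hcm : (mapD g).contains t.2.2 = false := by rw [contains_mapD]; exact hc'
    rw [if_neg (by simp [hcm])]
    have hgetD : g.getD t.2.2 [] = [] := PySem.Dict.getD_of_not_contains _ _ hc'
    rw [hgetD]
    apply PySem.Dict.ext
    rw [PySem.Dict.items_insert_of_not_contains _ _ hcm]
    simp only [mapD]
    rw [PySem.Dict.items_insert_of_not_contains _ _ hc']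
    cases g with
    | mk items => simp [pyMaxList_singleton]

lemma fold_comm (l : List (Int × Int × String)) :
    ∀ g : PySem.Dict String (List Int), GInv g →
      l.foldl stepA (mapD g) = mapD (l.foldl stepB g) := by
  induction l with
  | nil => intro g _; rfl
  | cons t rest ih =>
      intro g hg
      simp only [List.foldl_cons]
      rw [step_comm g t hg]
      exact ih (stepB g t) (ginv_stepB g t hg)

lemma ginv_fold (l : List (Int × Int × String)) :
    ∀ g : PySem.Dict String (List Int), GInv g → GInv (l.foldl stepB g) := by
  induction l with
  | nil => intro g hg; exact hg
  | cons t rest ih => intro g hg; exact ih (stepB g t) (ginv_stepB g t hg)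

lemma ginv_empty : GInv PySem.Dict.empty := by
  constructor
  · simp [PySem.Dict.empty, PySem.Dict.keys]
  · intro kv hkv; simp [PySem.Dict.empty] at hkv

lemma mapD_empty : mapD PySem.Dict.empty = PySem.Dict.empty := by
  apply PySem.Dict.ext; simp [mapD, PySem.Dict.empty]

-- dict comprehension over a nodup-keyed list is the list itself
lemma items_ofList_nodup {ν : Type} (xs : List (String × ν)) (h : (xs.map Prod.fst).Nodup) :
    (PySem.Dict.ofList xs).items = xs := by
  have := PySem.Dict.items_foldl_insert_fresh xs Prod.fst Prod.snd PySem.Dict.empty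
    (fun a _ => by simp [PySem.Dict.empty, PySem.Dict.contains_mk]) h
  simpa [PySem.Dict.ofList, PySem.Dict.update, PySem.Dict.empty] using this

-- ===== VERDICT (by name: the statement is the Claim_ definition above) =====
theorem task_2_spec : Claim_equal_task_2 := by
  intro l _
  unfold Spec_task_2 task_2 task_2_alt
  have hinv := ginv_fold l PySem.Dict.empty ginv_empty
  set grouped := l.foldl stepB PySem.Dict.empty with hgrp
  have hA : l.foldl stepA PySem.Dict.empty = mapD grouped := by
    have := fold_comm l PySem.Dict.empty ginv_empty
    rw [mapD_empty] at this
    exact this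
  have hkeys : ((grouped.items.map (fun kv => (kv.1, pyMaxList kv.2))).map Prod.fst).Nodup := by
    have he : (grouped.items.map (fun kv => (kv.1, pyMaxList kv.2))).map Prod.fst = grouped.keys := by
      simp [PySem.Dict.keys, List.map_map, Function.comp_def]
    rw [he]; exact hinv.1
  have hB : (PySem.Dict.ofList (grouped.items.map (fun kv => (kv.1, pyMaxList kv.2)))).items
      = (mapD grouped).items := by
    rw [items_ofList_nodup _ hkeys]; rfl
  change (PySem.Dict.ofList (PySem.List.sorted (l.foldl stepA PySem.Dict.empty).items
      (fun item => item.2))).items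
    = (PySem.Dict.ofList (PySem.List.sorted
        (PySem.Dict.ofList (grouped.items.map (fun kv => (kv.1, pyMaxList kv.2)))).items
        (fun item => item.2))).items
  rw [hA, hB]
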